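-- pv_equiv track=rewrite | github.com/Kwejovi/mini_bioinfo_projects | genomics_suite/alignment_free_compare.py | kmer_set
-- ===== SOURCE A (Python) =====
-- def kmer_set(seq, k):
--     seq = seq.upper()
--     kmers = set()
--     for i in range(len(seq) - k + 1):
--         kmer = seq[i:i+k]
--         if "N" not in kmer:
--             kmers.add(kmer)
--     return kmers
-- ===== SOURCE B (Python) =====
-- def kmer_set(seq, k):
--     kmers = set()
--     for segment in seq.upper().split("N"):
--         for i in range(len(segment) - k + 1):
--             kmers.add(segment[i:i+k])
--     return kmers
-- ===== Notes on version B (the rewrite author's own statement) =====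
-- stated objective: alternative
-- what changed: Instead of scanning every window of the whole sequence and testing each slice for 'N', B splits the uppercased sequence on 'N' into maximal N-free segments and slides a window over each segment, so no per-window membership test is performed.
-- outside the precondition, e.g. on kmer_set('NAA', -1): A returns {''}, B returns {'', 'A'}
import Mathlib
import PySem

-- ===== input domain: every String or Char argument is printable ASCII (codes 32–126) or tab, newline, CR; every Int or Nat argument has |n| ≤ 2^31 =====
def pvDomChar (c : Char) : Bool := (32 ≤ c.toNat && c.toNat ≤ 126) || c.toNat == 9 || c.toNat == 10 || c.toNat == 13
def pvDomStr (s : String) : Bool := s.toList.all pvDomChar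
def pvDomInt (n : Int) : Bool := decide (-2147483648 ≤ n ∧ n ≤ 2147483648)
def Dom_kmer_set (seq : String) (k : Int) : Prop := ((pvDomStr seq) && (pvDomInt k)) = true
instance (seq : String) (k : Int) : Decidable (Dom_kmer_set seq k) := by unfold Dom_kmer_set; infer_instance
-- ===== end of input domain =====

-- B splits the uppercased sequence on 'N' into maximal N-free segments and windows each
-- segment, instead of testing every window of the whole sequence for 'N' (alternative
-- algorithm, same cost); Pre_ excludes k < 0, where A's slices get negative stops.


-- ===== PORT A =====
def kmer_set (seq : String) (k : Int) : List String :=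
  let s := PySem.Str.upper seq
  (PySem.List.pyRange 0 (PySem.Str.len s - k + 1) 1).foldl
    (fun kmers i =>
      let kmer := PySem.Str.slice s (some i) (some (i + k))
      if PySem.Str.isIn "N" kmer then kmers else PySem.Set.add kmers kmer)
    PySem.Set.empty

-- ===== PORT B =====
def kmer_set_alt (seq : String) (k : Int) : List String :=
  ((PySem.Str.split? (PySem.Str.upper seq) "N").getD []).foldl
    (fun kmers segment =>
      (PySem.List.pyRange 0 (PySem.Str.len segment - k + 1) 1).foldl
        (fun kmers i => PySem.Set.add kmers (PySem.Str.slice segment (some i) (some (i + k))))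
        kmers)
    PySem.Set.empty

-- ===== PRECONDITION & SPEC =====
-- Pre_ excludes negative k on sequences that contain an 'N' (after uppercasing): there A
-- still returns a set, but Python's negative slice stops make seq[i:i+k] wrap to the end of
-- the string, an artefact of A's implementation that the split-into-segments strategy has no
-- reason to reproduce; on N-free sequences even negative k is covered and proved equal.
def Pre_kmer_set (seq : String) (k : Int) : Prop :=
  0 ≤ k ∨ 'N' ∉ PySem.Chars.upper seq.toList
instance (seq : String) (k : Int) : Decidable (Pre_kmer_set seq k) := by unfold Pre_kmer_set; infer_instance
def pvWitness_kmer_set : String × Int := ("ACGNTAn", 2)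

def Spec_kmer_set (seq : String) (k : Int) (out : List String) : Prop := out = kmer_set_alt seq k
instance (seq : String) (k : Int) (out : List String) : Decidable (Spec_kmer_set seq k out) := by unfold Spec_kmer_set; infer_instance

-- ===== CLAIM (what is proved, stated in full; the proofs are below) =====
def Claim_equal_kmer_set : Prop := ∀ (seq : String) (k : Int), Dom_kmer_set seq k → Pre_kmer_set seq k → Spec_kmer_set seq k (kmer_set seq k)

-- ===== LEMMAS AND PROOFS =====

-- the k-mer windows of a character list, as strings, in left-to-right order
def wins (u : List Char) (kn : Nat) : List String :=
  (List.range (u.length + 1 - kn)).map (fun i => String.ofList ((u.drop i).take kn))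

-- reference single-character split (what Python's s.split("N") computes)
def split1 : List Char → List (List Char)
  | [] => [[]]
  | c :: t =>
      if c = 'N' then [] :: split1 t
      else
        match split1 t with
        | [] => [[c]]
        | s :: r => (c :: s) :: r

theorem split1_ne_nil (l : List Char) : split1 l ≠ [] := by
  cases l with
  | nil => simp [split1]
  | cons c t =>
      simp only [split1]
      split
      · simp
      · split <;> simp

-- PySem's fuel-based splitOn agrees with split1 for the separator "N"
theorem splitOn_go_eq (fuel : Nat) :
    ∀ (l cur : List Char) (acc : List (List Char)), l.length < fuel →
      PySem.Chars.splitOn.go ['N'] fuel l cur acc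
        = acc.reverse ++ (match split1 l with
            | [] => []
            | s :: r => (cur.reverse ++ s) :: r) := by
  induction fuel with
  | zero => intro l cur acc h; omega
  | succ fuel ih =>
      intro l cur acc h
      cases l with
      | nil =>
          rw [PySem.Chars.splitOn.go]
          · simp [split1]
          · omega
      | cons c rest =>
          rw [PySem.Chars.splitOn.go]
          by_cases hc : c = 'N'
          · have hpre : List.isPrefixOf ['N'] (c :: rest) = true := by
              simp [List.isPrefixOf, hc]
            simp only [hpre, if_true, List.length_cons,
              List.drop_succ_cons, List.drop_zero, List.length_nil, Nat.zero_add]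
            rw [ih rest [] (cur.reverse :: acc) (by simpa using Nat.lt_of_succ_lt_succ h)]
            have h1 := split1_ne_nil rest
            rcases hs : split1 rest with _ | ⟨s, r⟩
            · exact absurd hs h1
            · simp [split1, hc, hs]
          · have hpre : List.isPrefixOf ['N'] (c :: rest) = false := by
              simp [List.isPrefixOf]
              exact fun h => hc h.symm
            simp only [hpre, Bool.false_eq_true, if_false]
            rw [ih rest (c :: cur) acc (by simpa using Nat.lt_of_succ_lt_succ h)]
            have h1 := split1_ne_nil rest
            rcases hs : split1 rest with _ | ⟨s, r⟩
            · exact absurd hs h1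
            · simp [split1, hc, hs]

theorem splitOn_eq_split1 (u : List Char) :
    PySem.Chars.splitOn u ['N'] = split1 u := by
  unfold PySem.Chars.splitOn
  rw [splitOn_go_eq (u.length + 1) u [] [] (by omega)]
  have h1 := split1_ne_nil u
  rcases hs : split1 u with _ | ⟨s, r⟩
  · exact absurd hs h1
  · simp

-- ---- window-list facts ----
theorem wins_cons (c : Char) (t : List Char) (kn : Nat) (h : kn ≤ t.length + 1) :
    wins (c :: t) kn = String.ofList ((c :: t).take kn) :: wins t kn := by
  unfold wins
  have h1 : t.length + 1 + 1 - kn = (t.length + 1 - kn) + 1 := by omega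
  simp only [List.length_cons, h1, List.range_succ_eq_map, List.map_cons, List.map_map,
    List.drop_zero]
  simp [Function.comp_def, List.drop_succ_cons]

theorem wins_nil_of_lt (u : List Char) (kn : Nat) (h : u.length < kn) : wins u kn = [] := by
  unfold wins
  have : u.length + 1 - kn = 0 := by omega
  simp [this]

theorem isIn_N_eq_contains (l : List Char) : PySem.Chars.isIn ['N'] l = l.contains 'N' := by
  by_cases h : 'N' ∈ l
  · obtain ⟨s, t, rfl⟩ := List.append_of_mem h
    have : ['N'] <:+: s ++ 'N' :: t := ⟨s, t, by simp⟩
    simp [(PySem.Chars.isIn_iff_infix _ _).2 this, h]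
  · have h2 : ¬ (['N'] <:+: l) := by
      intro hinf
      exact h (hinf.subset (by simp))
    simp [(PySem.Chars.isIn_eq_false_iff _ _).2 h2, h]

theorem q_ofList (w : List Char) :
    PySem.Str.isIn "N" (String.ofList w) = w.contains 'N' := by
  have hN : "N".toList = ['N'] := rfl
  rw [PySem.Str.isIn_eq, hN, String.toList_ofList, isIn_N_eq_contains]

theorem filter_wins_of_not_mem (u : List Char) (kn : Nat) (h : 'N' ∉ u) :
    (wins u kn).filter (fun w => !PySem.Str.isIn "N" w) = wins u kn := by
  apply List.filter_eq_self.2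
  intro w hw
  unfold wins at hw
  simp only [List.mem_map, List.mem_range] at hw
  obtain ⟨i, _, rfl⟩ := hw
  have hN : 'N' ∉ (u.drop i).take kn := by
    intro hmem
    exact h (List.mem_of_mem_drop (List.mem_of_mem_take hmem))
  simp [PySem.Str.isIn_eq, isIn_N_eq_contains, hN]

-- split1 decomposes the list at its first 'N'
theorem split1_cases (t : List Char) :
    ('N' ∉ t ∧ split1 t = [t]) ∨
      ∃ p r, 'N' ∉ p ∧ t = p ++ 'N' :: r ∧ split1 t = p :: split1 r := by
  induction t with
  | nil => left; simp [split1]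
  | cons c t ih =>
      by_cases hc : c = 'N'
      · right
        exact ⟨[], t, by simp, by simp [hc], by simp [split1, hc]⟩
      · rcases ih with ⟨hmem, heq⟩ | ⟨p, r, hp, rfl, heq⟩
        · left
          refine ⟨by simp [hmem]; exact fun h => hc h.symm, ?_⟩
          simp [split1, hc, heq]
        · right
          refine ⟨c :: p, r, by simp [hp]; exact fun h => hc h.symm, by simp, ?_⟩
          simp [split1, hc, heq]

-- ---- generic loop shapes ----
theorem foldl_add_ite {α ι : Type} [BEq α] (f : ι → α) (q : α → Bool) :
    ∀ (l : List ι) (init : PySem.Set α),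
      l.foldl (fun acc x => if q (f x) then acc else PySem.Set.add acc (f x)) init
        = PySem.Set.update init ((l.map f).filter (fun y => !q y)) := by
  intro l
  induction l with
  | nil => intro init; simp [PySem.Set.update]
  | cons x l ih =>
      intro init
      by_cases hq : q (f x)
      · simp [hq, ih]
      · simp [hq, ih, PySem.Set.update]

theorem foldl_update_eq_flatMap {α ι : Type} [BEq α] (g : ι → List α) :
    ∀ (l : List ι) (init : PySem.Set α),
      l.foldl (fun acc x => PySem.Set.update acc (g x)) init
        = PySem.Set.update init (l.flatMap g) := by
  intro l
  induction l with
  | nil => intro init; simp [PySem.Set.update]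
  | cons x l ih =>
      intro init
      have := ih (PySem.Set.update init (g x))
      simp only [PySem.Set.update] at this ⊢
      simp [this, List.foldl_append]

theorem foldl_add_eq_update {α ι : Type} [BEq α] (f : ι → α) (l : List ι) (init : PySem.Set α) :
    l.foldl (fun acc x => PySem.Set.add acc (f x)) init = PySem.Set.update init (l.map f) := by
  simp [PySem.Set.update, List.foldl_map]

-- key step: windows across the first 'N' separator
theorem wins_append_sep (p r : List Char) (kn : Nat) (hp : 'N' ∉ p) :
    (wins (p ++ 'N' :: r) kn).filter (fun w => !PySem.Str.isIn "N" w)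
      = wins p kn ++ (wins r kn).filter (fun w => !PySem.Str.isIn "N" w) := by
  induction p with
  | nil =>
      simp only [List.nil_append]
      by_cases hkr : kn ≤ r.length + 1
      · rw [wins_cons 'N' r kn hkr, List.filter_cons]
        cases kn with
        | zero =>
            simp [wins, isIn_N_eq_contains]
        | succ m =>
            have htake : ('N' :: r).take (m + 1) = 'N' :: r.take m := by simp
            rw [htake]
            simp [isIn_N_eq_contains, wins_nil_of_lt [] (m+1) (by simp)]
      · rw [wins_nil_of_lt ('N' :: r) kn (by simp; omega),
          wins_nil_of_lt [] kn (by simp; omega),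
          wins_nil_of_lt r kn (by omega)]
        simp
  | cons c p' ih =>
      have hc : c ≠ 'N' := by intro h; exact hp (by simp [h])
      have hp' : 'N' ∉ p' := by intro h; exact hp (by simp [h])
      have hu : (c :: p') ++ 'N' :: r = c :: (p' ++ 'N' :: r) := by simp
      rw [hu]
      by_cases h1 : kn ≤ (p' ++ 'N' :: r).length + 1
      · rw [wins_cons c (p' ++ 'N' :: r) kn h1, List.filter_cons, ih hp']
        by_cases h2 : kn ≤ p'.length + 1
        · have htake : (c :: (p' ++ 'N' :: r)).take kn = (c :: p').take kn := by
            rw [← hu]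
            exact List.take_append_of_le_length (by simp; omega)
          have hq : PySem.Str.isIn "N" (String.ofList ((c :: (p' ++ 'N' :: r)).take kn)) = false := by
            rw [htake, q_ofList]
            simp only [List.contains_eq_mem, decide_eq_false_iff_not]
            intro hmem
            have := List.mem_of_mem_take hmem
            rcases List.mem_cons.1 this with h | h
            · exact hc h.symm
            · exact hp' h
          rw [hq]
          simp only [Bool.not_false, if_true]
          rw [wins_cons c p' kn h2, htake]
          simp
        · have hq : PySem.Str.isIn "N" (String.ofList ((c :: (p' ++ 'N' :: r)).take kn)) = true := by
            rw [q_ofList]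
            simp only [List.contains_eq_mem, decide_eq_true_eq]
            rw [← hu, List.take_append]
            apply List.mem_append_right
            have hlen : kn - (c :: p').length = (kn - (c :: p').length - 1) + 1 := by
              simp only [List.length_cons]; omega
            rw [hlen]
            simp
          rw [hq]
          simp only [Bool.not_true]
          rw [wins_nil_of_lt (c :: p') kn (by simp; omega)]
          simp
          exact wins_nil_of_lt p' kn (by omega)
      · rw [wins_nil_of_lt (c :: (p' ++ 'N' :: r)) kn (by simp at h1 ⊢; omega),
          wins_nil_of_lt (c :: p') kn (by simp at h1 ⊢; omega),
          wins_nil_of_lt r kn (by simp at h1 ⊢; omega)]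
        simp

-- the core: N-free windows of the whole string = windows of the N-separated segments
theorem core (kn : Nat) :
    ∀ (N : Nat) (u : List Char), u.length ≤ N →
      (wins u kn).filter (fun w => !PySem.Str.isIn "N" w)
        = (split1 u).flatMap (fun seg => wins seg kn) := by
  intro N
  induction N with
  | zero =>
      intro u hu
      have : u = [] := List.eq_nil_of_length_eq_zero (by omega)
      subst this
      rw [show split1 [] = [[]] from rfl]
      simp only [List.flatMap_cons, List.flatMap_nil, List.append_nil]
      exact filter_wins_of_not_mem [] kn (by simp)
  | succ N ih =>
      intro u hu
      rcases split1_cases u with ⟨hmem, heq⟩ | ⟨p, r, hp, rfl, heq⟩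
      · rw [heq, filter_wins_of_not_mem u kn hmem]
        simp
      · rw [heq]
        have hr : r.length ≤ N := by simp at hu; omega
        rw [List.flatMap_cons, ← ih r hr, wins_append_sep p r kn hp]

-- ---- reductions of the two ports ----
theorem window_map (u : List Char) (k : Int) (hk : 0 ≤ k) :
    (PySem.List.pyRange 0 (PySem.Str.len (String.ofList u) - k + 1) 1).map
        (fun i => PySem.Str.slice (String.ofList u) (some i) (some (i + k)))
      = wins u k.toNat := by
  obtain ⟨kn, rfl⟩ : ∃ kn : Nat, k = (kn : Int) := ⟨k.toNat, (Int.toNat_of_nonneg hk).symm⟩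
  rw [PySem.List.pyRange_one, List.map_map]
  have hb : (PySem.Str.len (String.ofList u) - (kn : Int) + 1 - 0).toNat = u.length + 1 - kn := by
    rw [PySem.Str.len_eq, String.toList_ofList]
    omega
  rw [hb]
  unfold wins
  apply List.map_congr_left
  intro j hj
  simp only [Function.comp_apply, Int.zero_add, Int.toNat_natCast]
  unfold PySem.Str.slice PySem.Chars.slice
  rw [String.toList_ofList, PySem.List.slice_natCast_add]

theorem inner_loop_eq (seg : List Char) (k : Int) (hk : 0 ≤ k) (init : PySem.Set String) :
    (PySem.List.pyRange 0 (PySem.Str.len (String.ofList seg) - k + 1) 1).foldl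
        (fun kmers i => PySem.Set.add kmers
          (PySem.Str.slice (String.ofList seg) (some i) (some (i + k))))
        init
      = PySem.Set.update init (wins seg k.toNat) := by
  rw [foldl_add_eq_update (fun i => PySem.Str.slice (String.ofList seg) (some i) (some (i + k))),
    window_map seg k hk]

theorem kmer_set_eq (seq : String) (k : Int) (hk : 0 ≤ k) :
    kmer_set seq k
      = PySem.Set.update PySem.Set.empty
          ((wins (PySem.Chars.upper seq.toList) k.toNat).filter
            (fun w => !PySem.Str.isIn "N" w)) := by
  have hs : PySem.Str.upper seq = String.ofList (PySem.Chars.upper seq.toList) := rfl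
  show (PySem.List.pyRange 0 (PySem.Str.len (PySem.Str.upper seq) - k + 1) 1).foldl
      (fun kmers i =>
        if PySem.Str.isIn "N" (PySem.Str.slice (PySem.Str.upper seq) (some i) (some (i + k)))
        then kmers
        else PySem.Set.add kmers (PySem.Str.slice (PySem.Str.upper seq) (some i) (some (i + k))))
      PySem.Set.empty = _
  rw [hs, foldl_add_ite
    (fun i => PySem.Str.slice (String.ofList (PySem.Chars.upper seq.toList)) (some i) (some (i + k)))
    (PySem.Str.isIn "N"), window_map _ k hk]

theorem kmer_set_alt_eq (seq : String) (k : Int) (hk : 0 ≤ k) :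
    kmer_set_alt seq k
      = PySem.Set.update PySem.Set.empty
          ((split1 (PySem.Chars.upper seq.toList)).flatMap
            (fun seg => wins seg k.toNat)) := by
  have hs : PySem.Str.upper seq = String.ofList (PySem.Chars.upper seq.toList) := rfl
  have hsplit : (PySem.Str.split? (PySem.Str.upper seq) "N").getD []
      = (split1 (PySem.Chars.upper seq.toList)).map String.ofList := by
    rw [hs]
    unfold PySem.Str.split? PySem.Chars.split?
    have hN : ("N".toList : List Char) = ['N'] := rfl
    simp [hN, String.toList_ofList, splitOn_eq_split1]
  unfold kmer_set_alt
  rw [hsplit, List.foldl_map]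
  have hfun : (fun (kmers : PySem.Set String) (seg : List Char) =>
      (PySem.List.pyRange 0 (PySem.Str.len (String.ofList seg) - k + 1) 1).foldl
        (fun kmers i => PySem.Set.add kmers
          (PySem.Str.slice (String.ofList seg) (some i) (some (i + k)))) kmers)
      = fun kmers seg => PySem.Set.update kmers (wins seg k.toNat) := by
    funext kmers seg
    exact inner_loop_eq seg k hk kmers
  rw [hfun, foldl_update_eq_flatMap]

theorem split1_of_not_mem (u : List Char) (h : 'N' ∉ u) : split1 u = [u] := by
  rcases split1_cases u with ⟨_, heq⟩ | ⟨p, r, _, rfl, _⟩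
  · exact heq
  · exact absurd (by simp : 'N' ∈ p ++ 'N' :: r) h

theorem isIn_slice_eq_false (u : List Char) (a b : Option Int) (h : 'N' ∉ u) :
    PySem.Str.isIn "N" (PySem.Str.slice (String.ofList u) a b) = false := by
  have hN : "N".toList = ['N'] := rfl
  rw [PySem.Str.isIn_eq, hN, PySem.Str.toList_slice, String.toList_ofList, isIn_N_eq_contains]
  simp only [List.contains_eq_mem, decide_eq_false_iff_not]
  intro hmem
  exact h (PySem.List.mem_of_mem_slice u a b hmem)

-- on an N-free sequence both ports run the identical window loop, for every k
theorem noN_eq (seq : String) (k : Int) (h : 'N' ∉ PySem.Chars.upper seq.toList) :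
    kmer_set seq k = kmer_set_alt seq k := by
  have hs : PySem.Str.upper seq = String.ofList (PySem.Chars.upper seq.toList) := rfl
  have hA : kmer_set seq k
      = PySem.Set.update PySem.Set.empty
          (((PySem.List.pyRange 0
              (PySem.Str.len (String.ofList (PySem.Chars.upper seq.toList)) - k + 1) 1).map
            (fun i => PySem.Str.slice (String.ofList (PySem.Chars.upper seq.toList))
              (some i) (some (i + k))))) := by
    show (PySem.List.pyRange 0 (PySem.Str.len (PySem.Str.upper seq) - k + 1) 1).foldl
        (fun kmers i =>
          if PySem.Str.isIn "N" (PySem.Str.slice (PySem.Str.upper seq) (some i) (some (i + k)))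
          then kmers
          else PySem.Set.add kmers (PySem.Str.slice (PySem.Str.upper seq) (some i) (some (i + k))))
        PySem.Set.empty = _
    rw [hs, foldl_add_ite
      (fun i => PySem.Str.slice (String.ofList (PySem.Chars.upper seq.toList)) (some i) (some (i + k)))
      (PySem.Str.isIn "N")]
    congr 1
    apply List.filter_eq_self.2
    intro w hw
    simp only [List.mem_map] at hw
    obtain ⟨i, _, rfl⟩ := hw
    rw [isIn_slice_eq_false _ _ _ h]
    rfl
  have hsplit : (PySem.Str.split? (PySem.Str.upper seq) "N").getD []
      = [String.ofList (PySem.Chars.upper seq.toList)] := by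
    rw [hs]
    unfold PySem.Str.split? PySem.Chars.split?
    have hN : ("N".toList : List Char) = ['N'] := rfl
    simp [hN, String.toList_ofList, splitOn_eq_split1, split1_of_not_mem _ h]
  have hB : kmer_set_alt seq k
      = PySem.Set.update PySem.Set.empty
          (((PySem.List.pyRange 0
              (PySem.Str.len (String.ofList (PySem.Chars.upper seq.toList)) - k + 1) 1).map
            (fun i => PySem.Str.slice (String.ofList (PySem.Chars.upper seq.toList))
              (some i) (some (i + k))))) := by
    unfold kmer_set_alt
    rw [hsplit]
    simp only [List.foldl_cons, List.foldl_nil]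
    exact foldl_add_eq_update
      (fun i => PySem.Str.slice (String.ofList (PySem.Chars.upper seq.toList)) (some i) (some (i + k)))
      _ _
  rw [hA, hB]

-- ===== VERDICT (by name: the statement is the Claim_ definition above) =====
theorem kmer_set_spec : Claim_equal_kmer_set := by
  intro seq k _ hk
  unfold Spec_kmer_set
  rcases hk with hk | hN
  · rw [kmer_set_eq seq k hk, kmer_set_alt_eq seq k hk,
      core k.toNat (PySem.Chars.upper seq.toList).length _ le_rfl]
  · exact noN_eq seq k hN
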